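-- pv_equiv track=rewrite | github.com/Jennie421/6.009 | quiz2/quiz.py | most_after
-- ===== SOURCE A (Python) =====
-- def most_after(L):
--     """
--     >>> most_after([]) is None
--     True
--     >>> most_after([0]) is None
--     True
--     >>> most_after([0, 0])
--     0
--     >>> most_after([0, 1])
--     0
--     >>> most_after([0, 1, 0, 1])
--     1
--     >>> most_after([0, 1, 0, 1, 2])
--     1
--     >>> most_after([0, -1, 0, 1, 2])
--     0
--     >>> most_after([1, 1, 1, 1, 2, 2, 1])
--     2
--     >>> most_after([2, 2, 2, 2, 1, 1, 2])
--     2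
--     >>> most_after(list(range(100)))
--     98
--     >>> L = []
--     >>> for x in range(5,10):
--     ...     for y in range(7,14):
--     ...         for z in range(3,8):
--     ...             L.extend([x,y]*z)
--     >>> len(L)
--     1750
--     >>> most_after(L)
--     9
--     """
--
--     if len(L) == 0 or len(L) == 1:
--         return None
--
--     follow = dict() # map a number to the numbers following it
--
--     number_of_distinct_nums = dict()
--
--     for i in range(len(L)-1):
--         cur = L[i]
--         nxt = L[i+1]
--         if cur not in follow:
--             follow[cur] = set()
--         follow[cur].add(nxt)
--         number_of_distinct_nums[cur] = len(follow[cur])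
--
--     answer = None
--     length = 0
--
--     for num in sorted(L[:-1]):
--         if number_of_distinct_nums[num] >= length:
--             length = number_of_distinct_nums[num]
--             answer = num
--     return answer
-- ===== SOURCE B (Python) =====
-- def most_after(L):
--     if len(L) < 2:
--         return None
--     follow = {}
--     for cur, nxt in zip(L, L[1:]):
--         follow.setdefault(cur, set()).add(nxt)
--     return max(follow, key=lambda k: (len(follow[k]), k))
-- ===== Notes on version B (the rewrite author's own statement) =====
-- stated objective: alternative
-- what changed: B builds the follow-sets dict in one zip pass and selects the answer with a single max-with-key (count, value) pass over the dict's keys, replacing A's second counts dict and its sort of L[:-1] followed by a >=-scan (sort removed; measured ~1.4-1.5x, below the 1.5x confirmation bar).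
import Mathlib
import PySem

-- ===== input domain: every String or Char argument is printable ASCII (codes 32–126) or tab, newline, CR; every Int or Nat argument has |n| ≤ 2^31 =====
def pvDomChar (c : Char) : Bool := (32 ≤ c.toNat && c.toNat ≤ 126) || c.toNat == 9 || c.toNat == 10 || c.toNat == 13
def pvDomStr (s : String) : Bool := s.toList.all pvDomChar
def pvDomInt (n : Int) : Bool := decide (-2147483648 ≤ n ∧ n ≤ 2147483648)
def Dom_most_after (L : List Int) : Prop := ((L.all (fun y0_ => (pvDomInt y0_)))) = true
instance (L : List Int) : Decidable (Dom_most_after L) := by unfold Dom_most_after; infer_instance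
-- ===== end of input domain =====

-- B replaces A's sort-then-scan selection by a single max-with-key pass over the follow dict's keys.

-- ===== PORT A =====
-- A's first loop: for i in range(len(L)-1), build `follow` (dict of sets) and
-- `number_of_distinct_nums` (counts dict).  L[i] is read with pyGetD (the index is
-- always in range here, so no IndexError is possible).
def pvBuildA (L : List Int) : PySem.Dict Int (PySem.Set Int) × PySem.Dict Int Int :=
  (PySem.List.pyRange 0 ((L.length : Int) - 1) 1).foldl
    (fun (st : PySem.Dict Int (PySem.Set Int) × PySem.Dict Int Int) i =>
      let cur := PySem.List.pyGetD L i 0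
      let nxt := PySem.List.pyGetD L (i + 1) 0
      let fl := if st.1.contains cur then st.1 else st.1.insert cur (PySem.Set.ofList [])
      let s := PySem.Set.add (fl.getD cur (PySem.Set.ofList [])) nxt
      (fl.insert cur s, st.2.insert cur (s.length : Int)))
    (PySem.Dict.empty, PySem.Dict.empty)

-- Literal port of A: the building loop above, then the scan over sorted(L[:-1]) keeping
-- the last element whose count is >= the running max.  number_of_distinct_nums[num] is
-- read with getD (num is always a key here, so no KeyError is possible).
def most_after (L : List Int) : Option Int :=
  if L.length = 0 ∨ L.length = 1 then none
  else
    ((PySem.List.sorted (PySem.List.slice L none (some (-1))) (fun x => x)).foldl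
      (fun (al : Option Int × Int) num =>
        if (pvBuildA L).2.getD num 0 ≥ al.2 then (some num, (pvBuildA L).2.getD num 0) else al)
      (none, 0)).1

-- ===== PORT B =====
-- B's single pass over zip(L, L[1:]) building the follow dict
-- (setdefault(cur, set()).add(nxt) = overwrite cur's entry, in place, with the enlarged set).
def pvFollowB (L : List Int) : PySem.Dict Int (PySem.Set Int) :=
  (L.zip (PySem.List.slice L (some 1) none)).foldl
    (fun (d : PySem.Dict Int (PySem.Set Int)) p =>
      d.insert p.1 (PySem.Set.add (d.getD p.1 (PySem.Set.ofList [])) p.2))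
    PySem.Dict.empty

-- Literal port of B: the pass above, then max(follow, key=lambda k: (len(follow[k]), k)).
def most_after_alt (L : List Int) : Option Int :=
  if L.length < 2 then none
  else
    PySem.List.max2? (pvFollowB L).keys
      (fun k => (((pvFollowB L).getD k (PySem.Set.ofList [])).length : Int)) (fun k => k)

-- ===== PRECONDITION & SPEC =====
def Spec_most_after (L : List Int) (out : Option Int) : Prop := out = most_after_alt L
instance (L : List Int) (out : Option Int) : Decidable (Spec_most_after L out) := by unfold Spec_most_after; infer_instance

-- ===== CLAIM (what is proved, stated in full; the proofs are below) =====
def Claim_equal_most_after : Prop := ∀ (L : List Int), Dom_most_after L → Spec_most_after L (most_after L)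

-- ===== LEMMAS AND PROOFS =====

-- the B-side dict-building step, named for the proofs
def pvStepB (d : PySem.Dict Int (PySem.Set Int)) (p : Int × Int) : PySem.Dict Int (PySem.Set Int) :=
  d.insert p.1 (PySem.Set.add (d.getD p.1 (PySem.Set.ofList [])) p.2)

-- the counts dict n agrees with the follow dict d on every key of d
def pvInv (d : PySem.Dict Int (PySem.Set Int)) (n : PySem.Dict Int Int) : Prop :=
  ∀ k ∈ d.keys, n.getD k 0 = ((d.getD k (PySem.Set.ofList [])).length : Int)

-- lex-≤ on the key (f y, y), and its transitivity
def pvLle (f : Int → Int) (a b : Int) : Prop := f a < f b ∨ (f a = f b ∧ a ≤ b)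

theorem pvLle_trans (f : Int → Int) {a b c : Int} (h1 : pvLle f a b) (h2 : pvLle f b c) :
    pvLle f a c := by
  rcases h1 with h1 | ⟨h1, h1'⟩ <;> rcases h2 with h2 | ⟨h2, h2'⟩
  · exact Or.inl (lt_trans h1 h2)
  · exact Or.inl (h2 ▸ h1)
  · exact Or.inl (h1 ▸ h2)
  · exact Or.inr ⟨h1.trans h2, le_trans h1' h2'⟩

-- an index loop reading xs[i], xs[i+1] for i in range(len(xs)-1) is a fold over adjacent pairs
theorem pv_foldl_range_pairs {σ : Type} (g : σ → Int → Int → σ) :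
    ∀ (xs : List Int) (init : σ),
      (List.range (xs.length - 1)).foldl (fun acc i => g acc (xs.getD i 0) (xs.getD (i+1) 0)) init
      = (xs.zip xs.tail).foldl (fun acc p => g acc p.1 p.2) init := by
  intro xs
  induction xs with
  | nil => intro init; simp
  | cons x rest ih =>
    intro init
    match rest with
    | [] => simp
    | y :: t =>
      have hlen : (x :: y :: t).length - 1 = t.length + 1 := by simp
      rw [hlen, List.range_succ_eq_map, List.foldl_cons, List.foldl_map]
      have hfun : (fun (acc : σ) (i : Nat) =>
            g acc ((x :: y :: t).getD (Nat.succ i) 0) ((x :: y :: t).getD (Nat.succ i + 1) 0))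
          = fun acc i => g acc ((y :: t).getD i 0) ((y :: t).getD (i+1) 0) := by
        funext acc i; simp
      rw [hfun]
      have h0 : g init ((x :: y :: t).getD 0 0) ((x :: y :: t).getD (0+1) 0) = g init x y := by simp
      rw [h0]
      have := ih (g init x y)
      simpa using this

theorem pv_foldl_pyRange_pairs {σ : Type} (g : σ → Int → Int → σ) (xs : List Int) (init : σ) :
    (PySem.List.pyRange 0 ((xs.length : Int) - 1) 1).foldl
        (fun acc i => g acc (PySem.List.pyGetD xs i 0) (PySem.List.pyGetD xs (i+1) 0)) init
      = (xs.zip xs.tail).foldl (fun acc p => g acc p.1 p.2) init := by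
  rw [PySem.List.pyRange_one, List.foldl_map]
  have htn : ((xs.length : Int) - 1 - 0).toNat = xs.length - 1 := by omega
  rw [htn]
  have hfun : (fun (acc : σ) (k : Nat) =>
        g acc (PySem.List.pyGetD xs (0 + (k : Int)) 0) (PySem.List.pyGetD xs (0 + (k : Int) + 1) 0))
      = fun acc k => g acc (xs.getD k 0) (xs.getD (k+1) 0) := by
    funext acc k
    have h2 : ((k : Int) + 1) = ((k + 1 : Nat) : Int) := by push_cast; ring
    rw [show (0 : Int) + (k : Int) = ((k : Nat) : Int) by omega]
    rw [h2, PySem.List.pyGetD_natCast, PySem.List.pyGetD_natCast]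
  rw [hfun, pv_foldl_range_pairs]

-- A's building loop over the pairs: its follow dict is B's follow dict, and the counts
-- dict stays consistent with it
theorem pv_A_build (P : List (Int × Int)) :
    ∀ (d : PySem.Dict Int (PySem.Set Int)) (n : PySem.Dict Int Int), pvInv d n →
      ∃ n', (P.foldl
        (fun (st : PySem.Dict Int (PySem.Set Int) × PySem.Dict Int Int) (p : Int × Int) =>
          let fl := if st.1.contains p.1 then st.1 else st.1.insert p.1 (PySem.Set.ofList [])
          let s := PySem.Set.add (fl.getD p.1 (PySem.Set.ofList [])) p.2
          (fl.insert p.1 s, st.2.insert p.1 (s.length : Int))) (d, n))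
        = (P.foldl pvStepB d, n') ∧ pvInv (P.foldl pvStepB d) n' := by
  induction P with
  | nil => intro d n h; exact ⟨n, rfl, h⟩
  | cons p P ih =>
    intro d n h
    have hstep : (let fl := if d.contains p.1 then d else d.insert p.1 (PySem.Set.ofList [])
          let s := PySem.Set.add (fl.getD p.1 (PySem.Set.ofList [])) p.2
          ((fl.insert p.1 s, n.insert p.1 (s.length : Int)) :
            PySem.Dict Int (PySem.Set Int) × PySem.Dict Int Int))
        = (pvStepB d p,
           n.insert p.1 (((PySem.Set.add (d.getD p.1 (PySem.Set.ofList [])) p.2).length : Int))) := by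
      by_cases hc : d.contains p.1
      · simp only [hc, if_pos, pvStepB]
      · have hc' : d.contains p.1 = false := by simpa using hc
        simp only [hc', Bool.false_eq_true, if_false, pvStepB,
          PySem.Dict.getD_insert_self, PySem.Dict.insert_insert_self,
          PySem.Dict.getD_of_not_contains d (PySem.Set.ofList []) hc']
    have hinv : pvInv (pvStepB d p)
        (n.insert p.1 (((PySem.Set.add (d.getD p.1 (PySem.Set.ofList [])) p.2).length : Int))) := by
      intro k hk
      by_cases hkp : k = p.1
      · subst hkp
        simp [pvStepB, PySem.Dict.getD_insert_self]
      · have hk' : k ∈ d.keys := by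
          rcases (PySem.Dict.mem_keys_insert d p.1 k _).mp (by simpa [pvStepB] using hk) with h1 | h1
          · exact absurd h1 hkp
          · exact h1
        rw [pvStepB] at *
        rw [PySem.Dict.getD_insert_of_ne _ _ _ hkp, PySem.Dict.getD_insert_of_ne _ _ _ hkp]
        exact h k hk'
    simp only [List.foldl_cons]
    rw [hstep]
    exact ih _ _ hinv

theorem pv_mem_keys_build (P : List (Int × Int)) (k : Int) :
    k ∈ (P.foldl pvStepB PySem.Dict.empty).keys ↔ k ∈ P.map Prod.fst := by
  have h := PySem.Dict.keys_foldl_insert_key P Prod.fst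
    (fun d p => PySem.Set.add (d.getD p.1 (PySem.Set.ofList [])) p.2) (PySem.Dict.empty)
  have hs : (P.foldl pvStepB PySem.Dict.empty).keys
      = PySem.Set.update (PySem.Dict.empty : PySem.Dict Int (PySem.Set Int)).keys (P.map Prod.fst) := by
    rw [← h]; rfl
  rw [hs, PySem.Set.mem_update]
  simp [PySem.Dict.keys_empty]

theorem pv_map_fst_zip_tail : ∀ (L : List Int), (L.zip L.tail).map Prod.fst = L.dropLast := by
  intro L
  induction L with
  | nil => simp
  | cons x rest ih =>
    match rest with
    | [] => simp
    | y :: t => simpa using ih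

-- A's selection scan over a sorted list picks the largest element of maximal count
theorem pv_scanA (f : Int → Int) :
    ∀ (s : List Int), s.Pairwise (· ≤ ·) → (∀ x ∈ s, 0 ≤ f x) → s ≠ [] →
      ∃ m, (s.foldl (fun (al : Option Int × Int) num =>
              if f num ≥ al.2 then (some num, f num) else al) (none, 0)) = (some m, f m)
        ∧ m ∈ s ∧ ∀ y ∈ s, pvLle f y m := by
  have aux : ∀ (s : List Int) (a : Int), s.Pairwise (· ≤ ·) → (∀ y ∈ s, a ≤ y) →
      ∃ m, (s.foldl (fun (al : Option Int × Int) num =>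
              if f num ≥ al.2 then (some num, f num) else al) (some a, f a)) = (some m, f m)
        ∧ (m = a ∨ m ∈ s) ∧ f a ≤ f m ∧ a ≤ m
        ∧ ∀ y ∈ s, pvLle f y m := by
    intro s
    induction s with
    | nil => intro a _ _; exact ⟨a, rfl, Or.inl rfl, le_refl _, le_refl _, by simp⟩
    | cons x t ih =>
      intro a hp ha
      have hax : a ≤ x := ha x (List.mem_cons_self)
      have hpt : t.Pairwise (· ≤ ·) := hp.tail
      have hxt : ∀ y ∈ t, x ≤ y := fun y hy => (List.pairwise_cons.mp hp).1 y hy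
      simp only [List.foldl_cons]
      by_cases hge : f x ≥ f a
      · rw [if_pos hge]
        obtain ⟨m, hm, hmem, hfm, hxm, hall⟩ := ih x hpt hxt
        refine ⟨m, hm, ?_, le_trans hge hfm, le_trans hax hxm, ?_⟩
        · rcases hmem with h1 | h1
          · exact Or.inr (by simp [h1])
          · exact Or.inr (List.mem_cons_of_mem _ h1)
        · intro y hy
          rcases List.mem_cons.mp hy with rfl | hyt
          · by_cases h2 : f y = f m
            · exact Or.inr ⟨h2, hxm⟩
            · exact Or.inl (lt_of_le_of_ne hfm h2)
          · exact hall y hyt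
      · rw [if_neg hge]
        have hge' : f x < f a := lt_of_not_ge hge
        obtain ⟨m, hm, hmem, hfm, ham, hall⟩ := ih a hpt (fun y hy => le_trans hax (hxt y hy))
        refine ⟨m, hm, ?_, hfm, ham, ?_⟩
        · rcases hmem with h1 | h1
          · exact Or.inl h1
          · exact Or.inr (List.mem_cons_of_mem _ h1)
        · intro y hy
          rcases List.mem_cons.mp hy with rfl | hyt
          · exact Or.inl (lt_of_lt_of_le hge' hfm)
          · exact hall y hyt
  intro s hp h0 hne
  match s with
  | x :: t =>
    simp only [List.foldl_cons]
    rw [if_pos (h0 x List.mem_cons_self)]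
    obtain ⟨m, hm, hmem, hfm, hxm, hall⟩ := aux t x hp.tail
      (fun y hy => (List.pairwise_cons.mp hp).1 y hy)
    refine ⟨m, hm, ?_, ?_⟩
    · rcases hmem with h1 | h1
      · simp [h1]
      · exact List.mem_cons_of_mem _ h1
    · intro y hy
      rcases List.mem_cons.mp hy with rfl | hyt
      · by_cases h2 : f y = f m
        · exact Or.inr ⟨h2, hxm⟩
        · exact Or.inl (lt_of_le_of_ne hfm h2)
      · exact hall y hyt

-- the fold step of max(xs, key=lambda k: (f k, k)), named so the fold can be inducted on
def pvMaxStep (f : Int → Int) (acc : Option Int) (x : Int) : Option Int :=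
  match acc with
  | none => some x
  | some m => if (decide (f m < f x) || !decide (f x < f m) && decide (m < x)) = true
      then some x else some m

theorem pv_max2_eq_foldl (f : Int → Int) (xs : List Int) :
    PySem.List.max2? xs f (fun k => k) = xs.foldl (pvMaxStep f) none := by
  unfold PySem.List.max2?
  congr 1
  funext acc x
  cases acc <;> rfl

-- B's max(keys, key=(count, k)) picks the largest element of maximal count
theorem pv_max2_spec (f : Int → Int) (xs : List Int) (h : xs ≠ []) :
    ∃ m, PySem.List.max2? xs f (fun k => k) = some m
      ∧ m ∈ xs ∧ ∀ y ∈ xs, pvLle f y m := by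
  have aux : ∀ (xs : List Int) (a : Int),
      ∃ m, (xs.foldl (pvMaxStep f) (some a)) = some m
        ∧ (m = a ∨ m ∈ xs) ∧ pvLle f a m
        ∧ ∀ y ∈ xs, pvLle f y m := by
    intro xs
    induction xs with
    | nil =>
      intro a
      exact ⟨a, rfl, Or.inl rfl, Or.inr ⟨rfl, le_refl _⟩, by simp⟩
    | cons x t ih =>
      intro a
      simp only [List.foldl_cons]
      by_cases hup : (decide (f a < f x) || !decide (f x < f a) && decide (a < x)) = true
      · rw [show pvMaxStep f (some a) x = some x by simp [pvMaxStep, hup]]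
        obtain ⟨m, hm, hmem, hxm, hall⟩ := ih x
        have hax : pvLle f a x := by
          simp only [Bool.or_eq_true, Bool.and_eq_true, Bool.not_eq_true', decide_eq_true_eq,
            decide_eq_false_iff_not] at hup
          rcases hup with h1 | ⟨h1, h2⟩
          · exact Or.inl h1
          · by_cases heq : f a = f x
            · exact Or.inr ⟨heq, le_of_lt h2⟩
            · exact Or.inl (lt_of_le_of_ne (not_lt.mp h1) heq)
        refine ⟨m, hm, ?_, pvLle_trans f hax hxm, ?_⟩
        · rcases hmem with h1 | h1
          · exact Or.inr (by simp [h1])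
          · exact Or.inr (List.mem_cons_of_mem _ h1)
        · intro y hy
          rcases List.mem_cons.mp hy with rfl | hyt
          · exact hxm
          · exact hall y hyt
      · rw [show pvMaxStep f (some a) x = some a by simp only [pvMaxStep, if_neg hup]]
        obtain ⟨m, hm, hmem, ham, hall⟩ := ih a
        have hxa : pvLle f x a := by
          simp only [Bool.or_eq_true, Bool.and_eq_true, Bool.not_eq_true', decide_eq_true_eq,
            decide_eq_false_iff_not, not_or, not_and, not_lt] at hup
          obtain ⟨h1, h2⟩ := hup
          by_cases heq : f x = f a
          · exact Or.inr ⟨heq, h2 heq.ge⟩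
          · exact Or.inl (lt_of_le_of_ne h1 heq)
        refine ⟨m, hm, ?_, ham, ?_⟩
        · rcases hmem with h1 | h1
          · exact Or.inl h1
          · exact Or.inr (List.mem_cons_of_mem _ h1)
        · intro y hy
          rcases List.mem_cons.mp hy with rfl | hyt
          · exact pvLle_trans f hxa ham
          · exact hall y hyt
  match xs with
  | x :: t =>
    obtain ⟨m, hm, hmem, ham, hall⟩ := aux t x
    refine ⟨m, ?_, ?_, ?_⟩
    · rw [pv_max2_eq_foldl, List.foldl_cons]
      rw [show pvMaxStep f none x = some x from rfl]
      exact hm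
    · rcases hmem with h1 | h1
      · simp [h1]
      · exact List.mem_cons_of_mem _ h1
    · intro y hy
      rcases List.mem_cons.mp hy with rfl | hyt
      · exact ham
      · exact hall y hyt

-- pvBuildA, rephrased as a fold over the adjacent pairs
theorem pv_buildA_pairs (L : List Int) :
    pvBuildA L = (L.zip L.tail).foldl
        (fun (st : PySem.Dict Int (PySem.Set Int) × PySem.Dict Int Int) (p : Int × Int) =>
          let fl := if st.1.contains p.1 then st.1 else st.1.insert p.1 (PySem.Set.ofList [])
          let s := PySem.Set.add (fl.getD p.1 (PySem.Set.ofList [])) p.2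
          (fl.insert p.1 s, st.2.insert p.1 (s.length : Int)))
        (PySem.Dict.empty, PySem.Dict.empty) := by
  unfold pvBuildA
  exact pv_foldl_pyRange_pairs
    (fun st cur nxt =>
      let fl := if st.1.contains cur then st.1 else st.1.insert cur (PySem.Set.ofList [])
      let s := PySem.Set.add (fl.getD cur (PySem.Set.ofList [])) nxt
      (fl.insert cur s, st.2.insert cur (s.length : Int)))
    L (PySem.Dict.empty, PySem.Dict.empty)

theorem pv_followB_eq (L : List Int) :
    pvFollowB L = (L.zip L.tail).foldl pvStepB PySem.Dict.empty := by
  unfold pvFollowB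
  rw [PySem.List.slice_from_one]
  rfl

-- ===== VERDICT (by name: the statement is the Claim_ definition above) =====
theorem most_after_spec : Claim_equal_most_after := by
  intro L _
  unfold Spec_most_after
  by_cases hlen : L.length < 2
  · have hA : L.length = 0 ∨ L.length = 1 := by omega
    unfold most_after most_after_alt
    rw [if_pos hA, if_pos hlen]
  · have h2 : 2 ≤ L.length := not_lt.mp hlen
    unfold most_after most_after_alt
    rw [if_neg (by omega : ¬(L.length = 0 ∨ L.length = 1)), if_neg hlen]
    -- the common follow dict F and the counts dict n'
    obtain ⟨n', hn, hinv⟩ := pv_A_build (L.zip L.tail) PySem.Dict.empty PySem.Dict.empty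
      (by intro k hk; simp [PySem.Dict.keys_empty] at hk)
    have hB2 : pvBuildA L = ((L.zip L.tail).foldl pvStepB PySem.Dict.empty, n') := by
      rw [pv_buildA_pairs]; exact hn
    have hFB : pvFollowB L = (L.zip L.tail).foldl pvStepB PySem.Dict.empty := pv_followB_eq L
    simp only [hB2, hFB]
    -- membership in the follow dict's keys = membership in L[:-1]
    have hkeys : ∀ k, k ∈ ((L.zip L.tail).foldl pvStepB PySem.Dict.empty).keys ↔ k ∈ L.dropLast := by
      intro k
      rw [pv_mem_keys_build, pv_map_fst_zip_tail]
    have hdl : L.dropLast ≠ [] := by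
      intro hc
      have := congrArg List.length hc
      simp at this
      omega
    -- counts agree: on every element of L[:-1], number_of_distinct_nums = len(follow[k])
    have hcnt : ∀ k ∈ L.dropLast, n'.getD k 0
        = (((((L.zip L.tail).foldl pvStepB PySem.Dict.empty)).getD k (PySem.Set.ofList [])).length : Int) := by
      intro k hk
      exact hinv k ((hkeys k).mpr hk)
    -- A's side: the sorted scan
    rw [PySem.List.slice_to_neg_one]
    have hsp : (PySem.List.sorted L.dropLast (fun x => x)).Pairwise (· ≤ ·) := by
      have := PySem.List.sorted_pairwise L.dropLast (fun x => x)
      simpa using this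
    have hsne : PySem.List.sorted L.dropLast (fun x => x) ≠ [] := by
      rw [Ne, PySem.List.sorted_eq_nil_iff]
      exact hdl
    have hmem_s : ∀ y, y ∈ PySem.List.sorted L.dropLast (fun x => x) ↔ y ∈ L.dropLast := by
      intro y; exact PySem.List.mem_sorted L.dropLast (fun x => x) false y
    have hpos : ∀ x ∈ PySem.List.sorted L.dropLast (fun x => x), 0 ≤ n'.getD x 0 := by
      intro x hx
      rw [hcnt x ((hmem_s x).mp hx)]
      exact Int.natCast_nonneg _
    obtain ⟨mA, hmA, hmAmem, hmAmax⟩ :=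
      pv_scanA (fun num => n'.getD num 0) (PySem.List.sorted L.dropLast (fun x => x)) hsp hpos hsne
    rw [hmA]
    -- B's side: the max over the keys
    have hkne : ((L.zip L.tail).foldl pvStepB PySem.Dict.empty).keys ≠ [] := by
      intro hc
      obtain ⟨z, hz⟩ := List.exists_mem_of_ne_nil _ hdl
      have := (hkeys z).mpr hz
      rw [hc] at this
      exact absurd this (List.not_mem_nil)
    obtain ⟨mB, hmB, hmBmem, hmBmax⟩ :=
      pv_max2_spec (fun k => (((((L.zip L.tail).foldl pvStepB PySem.Dict.empty)).getD k
        (PySem.Set.ofList [])).length : Int)) _ hkne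
    rw [hmB]
    -- the two maxima coincide
    have hmAdl : mA ∈ L.dropLast := (hmem_s mA).mp hmAmem
    have hmBdl : mB ∈ L.dropLast := (hkeys mB).mp hmBmem
    -- transfer A's maximality to the count function of the dict
    have h1 : pvLle (fun k => (((((L.zip L.tail).foldl pvStepB PySem.Dict.empty)).getD k
        (PySem.Set.ofList [])).length : Int)) mB mA := by
      have := hmAmax mB ((hmem_s mB).mpr hmBdl)
      unfold pvLle at this ⊢
      beta_reduce at this ⊢
      rw [hcnt mB hmBdl, hcnt mA hmAdl] at this
      exact this
    have h2' : pvLle (fun k => (((((L.zip L.tail).foldl pvStepB PySem.Dict.empty)).getD k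
        (PySem.Set.ofList [])).length : Int)) mA mB := hmBmax mA ((hkeys mA).mpr hmAdl)
    have : mA = mB := by
      rcases h1 with ha | ⟨ha, ha'⟩ <;> rcases h2' with hb | ⟨hb, hb'⟩
      · exact absurd hb (lt_asymm ha)
      · exact absurd ha (by rw [hb]; exact lt_irrefl _)
      · exact absurd hb (by rw [ha]; exact lt_irrefl _)
      · exact le_antisymm hb' ha'
    rw [this]
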